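-- pv_equiv track=rewrite | github.com/thealper2/codewars-solutions | 7-kyu/plastic_balance.py | plastic_balance
-- ===== SOURCE A (Python) =====
-- def plastic_balance(lst):
--     if len(lst) < 2:
--         return lst
--
--     while len(lst) >= 2:
--         sum_sides = lst[0] + lst[-1]
--         sum_rest = sum(lst[1:-1]) if len(lst) > 2 else 0
--         if sum_sides == sum_rest:
--             return lst
--
--         lst = lst[1:-1]
--
--     return []
-- ===== SOURCE B (Python) =====
-- def plastic_balance(lst):
--     # One pass with a running total: rest-sum is derived from the total
--     # instead of re-summing a slice, and the answer is a single slice.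
--     n = len(lst)
--     if n < 2:
--         return lst
--     total = sum(lst)
--     i, j = 0, n - 1
--     while i < j:
--         sides = lst[i] + lst[j]
--         if total == 2 * sides:
--             return lst[i:j + 1]
--         total -= sides
--         i += 1
--         j -= 1
--     return []
-- ===== Notes on version B (the rewrite author's own statement) =====
-- stated objective: faster
-- what changed: B keeps a running total and two index pointers instead of re-summing and re-slicing the list on every trimming step, returning one final slice.
import Mathlib
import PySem

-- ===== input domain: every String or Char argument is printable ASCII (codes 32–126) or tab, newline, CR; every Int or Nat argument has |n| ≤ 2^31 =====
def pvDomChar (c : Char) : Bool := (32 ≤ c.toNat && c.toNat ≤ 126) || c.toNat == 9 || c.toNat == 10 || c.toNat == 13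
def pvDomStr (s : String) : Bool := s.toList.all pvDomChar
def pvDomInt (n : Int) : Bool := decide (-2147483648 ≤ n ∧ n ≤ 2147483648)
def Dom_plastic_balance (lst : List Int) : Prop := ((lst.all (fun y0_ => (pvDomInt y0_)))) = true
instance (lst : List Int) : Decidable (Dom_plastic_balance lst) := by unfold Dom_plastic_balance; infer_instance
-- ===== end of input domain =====

-- B replaces A's re-sum-and-re-slice loop (O(n^2)) by a running total with two
-- index pointers and one final slice (O(n)); same return value everywhere.

-- ===== PORT A =====
-- needed by pbA_loop's termination proof (lst[1:-1] = tail.dropLast)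
theorem pb_slice_mid (xs : List Int) :
    PySem.List.slice xs (some 1) (some (-1)) = xs.tail.dropLast := by
  simp only [PySem.List.slice, PySem.List.clampIdx]
  rcases xs with _ | ⟨a, t⟩
  · simp
  · simp [List.dropLast_eq_take, List.tail]
    rw [if_neg (by omega)]; omega

-- the 'while len(lst) >= 2' loop of A
def pbA_loop (lst : List Int) : List Int :=
  if 2 ≤ lst.length then
    let sum_sides := PySem.List.pyGetD lst 0 0 + PySem.List.pyGetD lst (-1) 0
    let sum_rest := if 2 < lst.length then (PySem.List.slice lst (some 1) (some (-1))).sum else 0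
    if sum_sides = sum_rest then lst
    else pbA_loop (PySem.List.slice lst (some 1) (some (-1)))
  else []
  termination_by lst.length
  decreasing_by rw [pb_slice_mid]; simp; omega

def plastic_balance (lst : List Int) : List Int :=
  if lst.length < 2 then lst else pbA_loop lst

-- ===== PORT B =====
-- the 'while i < j' loop of B
def pbB_loop (lst : List Int) (total : Int) (i j : Nat) : List Int :=
  if i < j then
    let sides := PySem.List.pyGetD lst (i : Int) 0 + PySem.List.pyGetD lst (j : Int) 0
    if total = 2 * sides then PySem.List.slice lst (some (i : Int)) (some ((j : Int) + 1))
    else pbB_loop lst (total - sides) (i + 1) (j - 1)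
  else []
  termination_by j - i
  decreasing_by omega

def plastic_balance_alt (lst : List Int) : List Int :=
  if lst.length < 2 then lst
  else pbB_loop lst lst.sum 0 (lst.length - 1)

-- ===== PRECONDITION & SPEC =====
def Spec_plastic_balance (lst : List Int) (out : List Int) : Prop := out = plastic_balance_alt lst
instance (lst : List Int) (out : List Int) : Decidable (Spec_plastic_balance lst out) := by unfold Spec_plastic_balance; infer_instance

-- ===== CLAIM (what is proved, stated in full; the proofs are below) =====
def Claim_equal_plastic_balance : Prop := ∀ (lst : List Int), Dom_plastic_balance lst → Spec_plastic_balance lst (plastic_balance lst)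

-- ===== LEMMAS AND PROOFS =====

-- the segment lst[i:j+1] decomposes as first element, middle, last element
theorem seg_decomp (lst : List Int) (i j : Nat) (hij : i < j) (hj : j < lst.length) :
    (lst.drop i).take (j + 1 - i)
      = lst.getD i 0 :: ((lst.drop (i + 1)).take (j - i - 1) ++ [lst.getD j 0]) := by
  have hi : i < lst.length := lt_trans hij hj
  rw [List.drop_eq_getElem_cons hi]
  have h1 : j + 1 - i = (j - i - 1) + 1 + 1 := by omega
  rw [h1, List.take_succ_cons, List.take_add_one]
  have h2 : (lst.drop (i + 1))[j - i - 1]? = some lst[j] := by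
    rw [List.getElem?_drop]
    have : i + 1 + (j - i - 1) = j := by omega
    rw [this, List.getElem?_eq_getElem hj]
  rw [h2]
  simp [List.getD, List.getElem?_eq_getElem hi, List.getElem?_eq_getElem hj]

theorem loop_eq (lst : List Int) (d i j : Nat) (hd : j - i = d)
    (hij : i < j) (hj : j < lst.length) :
    pbB_loop lst ((lst.drop i).take (j + 1 - i)).sum i j
      = pbA_loop ((lst.drop i).take (j + 1 - i)) := by
  induction d using Nat.strong_induction_on generalizing i j with
  | _ d IH =>
    have hdec := seg_decomp lst i j hij hj
    set mid := (lst.drop (i + 1)).take (j - i - 1) with hmid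
    have hmidlen : mid.length = j - i - 1 := by
      rw [hmid, List.length_take, List.length_drop]; omega
    have hslen : ((lst.drop i).take (j + 1 - i)).length = j - i + 1 := by
      rw [List.length_take, List.length_drop]; omega
    rw [pbB_loop, pbA_loop, if_pos hij, if_pos (by omega : 2 ≤ ((lst.drop i).take (j + 1 - i)).length)]
    have hsides : PySem.List.pyGetD ((lst.drop i).take (j + 1 - i)) 0 0
        + PySem.List.pyGetD ((lst.drop i).take (j + 1 - i)) (-1) 0
        = lst.getD i 0 + lst.getD j 0 := by
      rw [hdec, PySem.List.pyGetD_zero_cons, ← List.cons_append,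
        PySem.List.pyGetD_neg_one_append_singleton]
    have hmidslice : PySem.List.slice ((lst.drop i).take (j + 1 - i)) (some 1) (some (-1)) = mid := by
      rw [pb_slice_mid, hdec, List.tail_cons, List.dropLast_concat]
    have hrest : (if 2 < ((lst.drop i).take (j + 1 - i)).length
        then (PySem.List.slice ((lst.drop i).take (j + 1 - i)) (some 1) (some (-1))).sum else 0)
        = mid.sum := by
      rw [hmidslice]
      by_cases h2 : 2 < ((lst.drop i).take (j + 1 - i)).length
      · rw [if_pos h2]
      · rw [if_neg h2]
        have : mid = [] := by
          have : mid.length = 0 := by omega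
          exact List.eq_nil_of_length_eq_zero this
        rw [this, List.sum_nil]
    have hsum : ((lst.drop i).take (j + 1 - i)).sum = lst.getD i 0 + lst.getD j 0 + mid.sum := by
      rw [hdec]; simp; ring
    simp only [PySem.List.pyGetD_natCast, hsides, hrest, hsum]
    rw [hmidslice]
    split_ifs with h1 h2 h2
    · rw [show ((j : Int) + 1) = ((j + 1 : Nat) : Int) by push_cast; ring,
        PySem.List.slice_natCast]
    · exfalso; omega
    · exfalso; omega
    · rw [show lst.getD i 0 + lst.getD j 0 + mid.sum - (lst.getD i 0 + lst.getD j 0) = mid.sum from by ring]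
      by_cases hlt : i + 1 < j - 1
      · have hmid' : mid = (lst.drop (i + 1)).take ((j - 1) + 1 - (i + 1)) := by
          rw [hmid]; congr 1; omega
        rw [hmid']
        exact IH ((j - 1) - (i + 1)) (by omega) (i + 1) (j - 1) rfl hlt (by omega)
      · rw [pbB_loop, if_neg hlt, pbA_loop, if_neg (by omega)]

-- ===== VERDICT (by name: the statement is the Claim_ definition above) =====
theorem plastic_balance_spec : Claim_equal_plastic_balance := by
  intro lst _
  unfold Spec_plastic_balance plastic_balance plastic_balance_alt
  by_cases h : lst.length < 2
  · rw [if_pos h, if_pos h]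
  · rw [if_neg h, if_neg h]
    have hlem := loop_eq lst (lst.length - 1) 0 (lst.length - 1) rfl (by omega) (by omega)
    have hs : (lst.drop 0).take (lst.length - 1 + 1 - 0) = lst := by
      rw [List.drop_zero]
      exact List.take_of_length_le (by omega)
    rw [hs] at hlem
    exact hlem.symm
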